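-- pv_equiv track=rewrite | github.com/12-Twelvve/callbreak_card_game | app.py | hardBidding
-- ===== SOURCE A (Python) =====
-- def get_same_suit_cards(cards, suit):
--     return [c for c in cards if c[-1]==suit]
--
-- def get_suit(card):
--     return card[-1]
--
-- def is_ace(card):
--     if "1" == card[:-1]:
--         return True
--     else:
--         return False
--
-- def is_king(card):
--     if "K" ==card[:-1]:
--         return True
--     else:
--         return False
--
-- def is_Queen(card):
--     if "Q" ==card[:-1]:
--         return True
--     else:
--         return False
--
-- def have_JQT(cards):
--     for i in cards:
--         if 'J' in i or 'Q' in i or 'T' in i: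
--             return True
--     return False
--
-- def have_Q(cards):
--     for i in cards:
--         if 'Q' in i :
--             return True
--     return False
--
-- def have_K(cards):
--     for i in cards:
--         if is_king(i):
--             return True
--     return False
--
-- def have_A(cards):
--     for i in cards:
--         if is_ace(i):
--             return True
--     return False
--
-- def hardBidding(hands):
--     count=0
--     C = get_same_suit_cards(hands, "C")
--     D = get_same_suit_cards(hands, "D")
--     H = get_same_suit_cards(hands, "H")
--     S = get_same_suit_cards(hands, "S")
--     for i in hands:
--         if is_ace(i):
--             count+=1
--         elif is_king(i):
--             k_cards = get_same_suit_cards(hands, get_suit(i))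
--             if len(k_cards) <= 3 and len(k_cards)>1:
--                 count +=1
--             else:
--                 if have_A(k_cards) and len(k_cards) <=6 or have_JQT(k_cards)  and len(k_cards) <= 6:
--                     count += 1
--         elif is_Queen(i):
--             q_cards = get_same_suit_cards(hands, get_suit(i))
--             if 4>=len(C)>=3 and 4>=len(D)>=3  and 4>=len(H)>=3:
--                 if have_K(q_cards) and have_A(q_cards):
--                     count +=1
--     spades_length = len(S)
--     if spades_length>6:
--         if have_K(S):
--             count +=1
--         if have_Q(S):
--             count +=1
--     if len(C)<2:
--         count+=1
--     if len(D)<2: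
--         count+=1
--     if len(H)<2:
--         count+=1
--     if spades_length > 3:
--         count += spades_length-3
--     if 2<spades_length<4:
--         if len(C)<2 or len(H)<2 or len(D)<2:
--             count +=2
--     if count >=8:
--         return 8
--     if count <= 0:
--         return 1
--     else:
--         return count
-- ===== SOURCE B (Python) =====
-- # B: traverses the hand suit-by-suit (distinct suits computed once), aggregating per-suit
-- # rank counts arithmetically instead of A's flat per-card loop with repeated group rescans.
-- def suit_cards(hands, s):
--     return [c for c in hands if c[-1] == s]
--
-- def hardBidding(hands):
--     suits = []
--     for c in hands:
--         if c[-1] not in suits: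
--             suits.append(c[-1])
--     C = suit_cards(hands, 'C')
--     D = suit_cards(hands, 'D')
--     H = suit_cards(hands, 'H')
--     S = suit_cards(hands, 'S')
--     mid = 3 <= len(C) <= 4 and 3 <= len(D) <= 4 and 3 <= len(H) <= 4
--     count = 0
--     for s in suits:
--         g = suit_cards(hands, s)
--         n = len(g)
--         has_ace = any(c[:-1] == '1' for c in g)
--         has_king = any(c[:-1] == 'K' for c in g)
--         has_jqt = any('J' in c or 'Q' in c or 'T' in c for c in g)
--         aces = sum(c[:-1] == '1' for c in g)
--         kings = sum(c[:-1] == 'K' for c in g)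
--         queens = sum(c[:-1] == 'Q' for c in g)
--         if 1 < n <= 3 or (n <= 6 and (has_ace or has_jqt)):
--             count += kings
--         if mid and has_king and has_ace:
--             count += queens
--         count += aces
--     sn = len(S)
--     if sn > 6:
--         count += any(c[:-1] == 'K' for c in S) + any('Q' in c for c in S)
--     count += (len(C) < 2) + (len(D) < 2) + (len(H) < 2)
--     count += max(sn - 3, 0)
--     if sn == 3 and (len(C) < 2 or len(H) < 2 or len(D) < 2):
--         count += 2
--     return 8 if count >= 8 else max(count, 1)
-- ===== Notes on version B (the rewrite author's own statement) =====
-- stated objective: alternative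
-- what changed: B builds the distinct-suit list once and traverses the hand suit-by-suit, computing per-suit ace/king/queen counts and adding them arithmetically, instead of A's flat per-card loop that re-filters the whole hand for every king/queen card.
-- outside the precondition, e.g. on hardBidding(['1S', '']): A raises IndexError, B raises IndexError
import Mathlib
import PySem

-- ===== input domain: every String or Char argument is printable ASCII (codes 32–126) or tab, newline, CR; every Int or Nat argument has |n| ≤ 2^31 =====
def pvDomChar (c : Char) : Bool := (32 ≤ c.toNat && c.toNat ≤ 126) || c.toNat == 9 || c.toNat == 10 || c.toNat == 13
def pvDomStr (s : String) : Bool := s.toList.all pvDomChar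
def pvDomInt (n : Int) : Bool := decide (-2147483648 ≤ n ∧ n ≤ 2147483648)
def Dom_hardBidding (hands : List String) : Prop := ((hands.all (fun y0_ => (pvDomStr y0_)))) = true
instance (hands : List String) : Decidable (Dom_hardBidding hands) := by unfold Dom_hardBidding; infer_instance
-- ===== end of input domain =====

-- B traverses the hand suit-by-suit with per-suit rank counts instead of A's flat
-- per-card loop that rescans the hand per king/queen; return values proved equal on
-- hands of nonempty strings (an empty string makes both Pythons raise IndexError).

-- ===== PORT A =====
-- c[-1]; Pre_ guarantees every card is nonempty, so the default is never used
def pvSuitA (c : String) : Char := (PySem.Str.pyGet? c (-1)).getD ' '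

def getSameSuitCards (cards : List String) (suit : Char) : List String :=
  cards.filter (fun c => pvSuitA c == suit)

def pvIsAce (card : String) : Bool := PySem.Str.slice card none (some (-1)) == "1"
def pvIsKing (card : String) : Bool := PySem.Str.slice card none (some (-1)) == "K"
def pvIsQueen (card : String) : Bool := PySem.Str.slice card none (some (-1)) == "Q"

def pvHaveJQT (cards : List String) : Bool :=
  cards.any (fun i => PySem.Str.isIn "J" i || PySem.Str.isIn "Q" i || PySem.Str.isIn "T" i)
def pvHaveQ (cards : List String) : Bool := cards.any (fun i => PySem.Str.isIn "Q" i)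
def pvHaveK (cards : List String) : Bool := cards.any (fun i => pvIsKing i)
def pvHaveA (cards : List String) : Bool := cards.any (fun i => pvIsAce i)

def hardBidding (hands : List String) : Int :=
  let C := getSameSuitCards hands 'C'
  let D := getSameSuitCards hands 'D'
  let H := getSameSuitCards hands 'H'
  let S := getSameSuitCards hands 'S'
  let count : Int := hands.foldl (fun count i =>
    if pvIsAce i then count + 1
    else if pvIsKing i then
      let kCards := getSameSuitCards hands (pvSuitA i)
      if kCards.length ≤ 3 ∧ kCards.length > 1 then count + 1
      else if (pvHaveA kCards && decide (kCards.length ≤ 6)) ||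
              (pvHaveJQT kCards && decide (kCards.length ≤ 6)) then count + 1
      else count
    else if pvIsQueen i then
      let qCards := getSameSuitCards hands (pvSuitA i)
      if (4 ≥ C.length ∧ C.length ≥ 3) ∧ (4 ≥ D.length ∧ D.length ≥ 3) ∧
         (4 ≥ H.length ∧ H.length ≥ 3) then
        if pvHaveK qCards && pvHaveA qCards then count + 1 else count
      else count
    else count) 0
  let spadesLength : Int := S.length
  let count := if spadesLength > 6 then
      let count := if pvHaveK S then count + 1 else count
      if pvHaveQ S then count + 1 else count
    else count
  let count := if C.length < 2 then count + 1 else count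
  let count := if D.length < 2 then count + 1 else count
  let count := if H.length < 2 then count + 1 else count
  let count := if spadesLength > 3 then count + (spadesLength - 3) else count
  let count := if 2 < spadesLength ∧ spadesLength < 4 then
      if C.length < 2 ∨ H.length < 2 ∨ D.length < 2 then count + 2 else count
    else count
  if count ≥ 8 then 8 else if count ≤ 0 then 1 else count

-- ===== PORT B =====
def pvSuitB (c : String) : Char := (PySem.Str.pyGet? c (-1)).getD ' '

def pvSuitCardsB (hands : List String) (s : Char) : List String :=
  hands.filter (fun c => pvSuitB c == s)

def pvRankB (c : String) : String := PySem.Str.slice c none (some (-1))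

def hardBidding_alt (hands : List String) : Int :=
  let suits : List Char := hands.foldl
    (fun acc c => if pvSuitB c ∈ acc then acc else acc ++ [pvSuitB c]) []
  let C := pvSuitCardsB hands 'C'
  let D := pvSuitCardsB hands 'D'
  let H := pvSuitCardsB hands 'H'
  let S := pvSuitCardsB hands 'S'
  let mid := decide (3 ≤ C.length ∧ C.length ≤ 4) && decide (3 ≤ D.length ∧ D.length ≤ 4)
             && decide (3 ≤ H.length ∧ H.length ≤ 4)
  let count : Int := suits.foldl (fun count s =>
    let g := pvSuitCardsB hands s
    let n := g.length
    let hasAce := g.any (fun c => pvRankB c == "1")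
    let hasKing := g.any (fun c => pvRankB c == "K")
    let hasJqt := g.any (fun c => PySem.Str.isIn "J" c || PySem.Str.isIn "Q" c || PySem.Str.isIn "T" c)
    let aces : Int := (g.map (fun c => if pvRankB c == "1" then (1 : Int) else 0)).sum
    let kings : Int := (g.map (fun c => if pvRankB c == "K" then (1 : Int) else 0)).sum
    let queens : Int := (g.map (fun c => if pvRankB c == "Q" then (1 : Int) else 0)).sum
    let count := if (1 < n ∧ n ≤ 3) ∨ (n ≤ 6 ∧ (hasAce || hasJqt) = true) then count + kings else count
    let count := if mid && hasKing && hasAce then count + queens else count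
    count + aces) 0
  let sn : Int := S.length
  let count := if sn > 6 then
      count + (if S.any (fun c => pvRankB c == "K") then 1 else 0)
            + (if S.any (fun c => PySem.Str.isIn "Q" c) then 1 else 0)
    else count
  let count := count + ((if C.length < 2 then (1 : Int) else 0) + (if D.length < 2 then (1 : Int) else 0)
            + (if H.length < 2 then (1 : Int) else 0))
  let count := count + max (sn - 3) 0
  let count := if sn = 3 ∧ (C.length < 2 ∨ H.length < 2 ∨ D.length < 2) then count + 2 else count
  min 8 (max 1 count)

-- ===== PRECONDITION & SPEC =====
-- Pre_ excludes hands containing an empty string: there c[-1] raises IndexError in A (and in B).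
def Pre_hardBidding (hands : List String) : Prop := ∀ s ∈ hands, s ≠ ""
instance (hands : List String) : Decidable (Pre_hardBidding hands) := by
  unfold Pre_hardBidding; infer_instance
def pvWitness_hardBidding : List String :=
  ["1S", "KS", "QS", "2S", "KH", "3H", "4H", "1C", "10C", "JC", "5D", "6D", "7D"]

def Spec_hardBidding (hands : List String) (out : Int) : Prop := out = hardBidding_alt hands
instance (hands : List String) (out : Int) : Decidable (Spec_hardBidding hands out) := by
  unfold Spec_hardBidding; infer_instance

-- ===== CLAIM (what is proved, stated in full; the proofs are below) =====
def Claim_equal_hardBidding : Prop := ∀ (hands : List String), Dom_hardBidding hands →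
  Pre_hardBidding hands → Spec_hardBidding hands (hardBidding hands)

-- ===== LEMMAS AND PROOFS =====

-- per-card contribution of A's main loop (kept in A's branch shape)
def pvCtb (hands : List String) (i : String) : Int :=
  if pvIsAce i then 1
  else if pvIsKing i then
    let kCards := getSameSuitCards hands (pvSuitA i)
    if kCards.length ≤ 3 ∧ kCards.length > 1 then 1
    else if (pvHaveA kCards && decide (kCards.length ≤ 6)) ||
            (pvHaveJQT kCards && decide (kCards.length ≤ 6)) then 1
    else 0
  else if pvIsQueen i then
    let qCards := getSameSuitCards hands (pvSuitA i)
    if (4 ≥ (getSameSuitCards hands 'C').length ∧ (getSameSuitCards hands 'C').length ≥ 3) ∧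
       (4 ≥ (getSameSuitCards hands 'D').length ∧ (getSameSuitCards hands 'D').length ≥ 3) ∧
       (4 ≥ (getSameSuitCards hands 'H').length ∧ (getSameSuitCards hands 'H').length ≥ 3) then
      if pvHaveK qCards && pvHaveA qCards then 1 else 0
    else 0
  else 0

-- A's main loop, zeta-reduced (definitionally the loop inside hardBidding)
def pvCountA (hands : List String) : Int :=
  hands.foldl (fun count i =>
    if pvIsAce i then count + 1
    else if pvIsKing i then
      let kCards := getSameSuitCards hands (pvSuitA i)
      if kCards.length ≤ 3 ∧ kCards.length > 1 then count + 1
      else if (pvHaveA kCards && decide (kCards.length ≤ 6)) ||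
              (pvHaveJQT kCards && decide (kCards.length ≤ 6)) then count + 1
      else count
    else if pvIsQueen i then
      let qCards := getSameSuitCards hands (pvSuitA i)
      if (4 ≥ (getSameSuitCards hands 'C').length ∧ (getSameSuitCards hands 'C').length ≥ 3) ∧
         (4 ≥ (getSameSuitCards hands 'D').length ∧ (getSameSuitCards hands 'D').length ≥ 3) ∧
         (4 ≥ (getSameSuitCards hands 'H').length ∧ (getSameSuitCards hands 'H').length ≥ 3) then
        if pvHaveK qCards && pvHaveA qCards then count + 1 else count
      else count
    else count) 0

-- B's distinct-suit list (definitionally the first loop inside hardBidding_alt)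
def pvSuitsB (hands : List String) : List Char :=
  hands.foldl (fun acc c => if pvSuitB c ∈ acc then acc else acc ++ [pvSuitB c]) []

-- B's per-suit contribution (its loop body, zeta-reduced, as a value added to count)
def pvPsv (hands : List String) (s : Char) : Int :=
  let g := pvSuitCardsB hands s
  let n := g.length
  let hasAce := g.any (fun c => pvRankB c == "1")
  let hasKing := g.any (fun c => pvRankB c == "K")
  let hasJqt := g.any (fun c => PySem.Str.isIn "J" c || PySem.Str.isIn "Q" c || PySem.Str.isIn "T" c)
  let aces : Int := (g.map (fun c => if pvRankB c == "1" then (1 : Int) else 0)).sum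
  let kings : Int := (g.map (fun c => if pvRankB c == "K" then (1 : Int) else 0)).sum
  let queens : Int := (g.map (fun c => if pvRankB c == "Q" then (1 : Int) else 0)).sum
  let mid := decide (3 ≤ (pvSuitCardsB hands 'C').length ∧ (pvSuitCardsB hands 'C').length ≤ 4)
    && decide (3 ≤ (pvSuitCardsB hands 'D').length ∧ (pvSuitCardsB hands 'D').length ≤ 4)
    && decide (3 ≤ (pvSuitCardsB hands 'H').length ∧ (pvSuitCardsB hands 'H').length ≤ 4)
  (if (1 < n ∧ n ≤ 3) ∨ (n ≤ 6 ∧ (hasAce || hasJqt) = true) then kings else 0)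
    + (if mid && hasKing && hasAce then queens else 0) + aces

-- B's main loop, zeta-reduced
def pvCountB (hands : List String) : Int :=
  (pvSuitsB hands).foldl (fun count s =>
    let g := pvSuitCardsB hands s
    let n := g.length
    let hasAce := g.any (fun c => pvRankB c == "1")
    let hasKing := g.any (fun c => pvRankB c == "K")
    let hasJqt := g.any (fun c => PySem.Str.isIn "J" c || PySem.Str.isIn "Q" c || PySem.Str.isIn "T" c)
    let aces : Int := (g.map (fun c => if pvRankB c == "1" then (1 : Int) else 0)).sum
    let kings : Int := (g.map (fun c => if pvRankB c == "K" then (1 : Int) else 0)).sum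
    let queens : Int := (g.map (fun c => if pvRankB c == "Q" then (1 : Int) else 0)).sum
    let mid := decide (3 ≤ (pvSuitCardsB hands 'C').length ∧ (pvSuitCardsB hands 'C').length ≤ 4)
      && decide (3 ≤ (pvSuitCardsB hands 'D').length ∧ (pvSuitCardsB hands 'D').length ≤ 4)
      && decide (3 ≤ (pvSuitCardsB hands 'H').length ∧ (pvSuitCardsB hands 'H').length ≤ 4)
    let count := if (1 < n ∧ n ≤ 3) ∨ (n ≤ 6 ∧ (hasAce || hasJqt) = true) then count + kings else count
    let count := if mid && hasKing && hasAce then count + queens else count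
    count + aces) 0

-- A's tail (the bonus/clamp cascade after the loop), abstracted over the groups and the count
def pvTailA (C D H S : List String) (count : Int) : Int :=
  let spadesLength : Int := S.length
  let count := if spadesLength > 6 then
      let count := if pvHaveK S then count + 1 else count
      if pvHaveQ S then count + 1 else count
    else count
  let count := if C.length < 2 then count + 1 else count
  let count := if D.length < 2 then count + 1 else count
  let count := if H.length < 2 then count + 1 else count
  let count := if spadesLength > 3 then count + (spadesLength - 3) else count
  let count := if 2 < spadesLength ∧ spadesLength < 4 then
      if C.length < 2 ∨ H.length < 2 ∨ D.length < 2 then count + 2 else count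
    else count
  if count ≥ 8 then 8 else if count ≤ 0 then 1 else count

-- B's tail, abstracted the same way
def pvTailB (C D H S : List String) (count : Int) : Int :=
  let sn : Int := S.length
  let count := if sn > 6 then
      count + (if S.any (fun c => pvRankB c == "K") then 1 else 0)
            + (if S.any (fun c => PySem.Str.isIn "Q" c) then 1 else 0)
    else count
  let count := count + ((if C.length < 2 then (1 : Int) else 0) + (if D.length < 2 then (1 : Int) else 0)
            + (if H.length < 2 then (1 : Int) else 0))
  let count := count + max (sn - 3) 0
  let count := if sn = 3 ∧ (C.length < 2 ∨ H.length < 2 ∨ D.length < 2) then count + 2 else count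
  min 8 (max 1 count)

lemma pv_ite_add (p : Prop) [Decidable p] (x v : Int) :
    (if p then x + v else x) = x + (if p then v else 0) := by split_ifs <;> omega

lemma pv_ite_add2 (p : Prop) [Decidable p] (x v w : Int) :
    (if p then x + v + w else x) = x + (if p then v + w else 0) := by split_ifs <;> omega

lemma pvClamp (v : Int) : (if v ≥ 8 then (8 : Int) else if v ≤ 0 then 1 else v) = min 8 (max 1 v) := by
  simp only [min_def, max_def]
  split_ifs <;> omega

lemma pvBor {a b : Bool} : (a || b) = true ↔ a = true ∨ b = true := by simp
lemma pvBand {a b : Bool} : (a && b) = true ↔ a = true ∧ b = true := by simp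

lemma pvTail_eq (C D H S : List String) (c : Int) : pvTailA C D H S c = pvTailB C D H S c := by
  have hbK : pvHaveK S = S.any (fun c => pvRankB c == "K") := rfl
  have hbQ : pvHaveQ S = S.any (fun c => PySem.Str.isIn "Q" c) := rfl
  simp only [pvTailA, pvTailB, hbK, hbQ, pv_ite_add, pv_ite_add2, pvClamp]
  have h3 : (if (S.length : Int) > 3 then (S.length : Int) - 3 else 0)
      = max ((S.length : Int) - 3) 0 := by
    simp only [max_def]; split_ifs <;> omega
  have h2 : (if 2 < (S.length : Int) ∧ (S.length : Int) < 4 then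
        (if C.length < 2 ∨ H.length < 2 ∨ D.length < 2 then (2 : Int) else 0) else 0)
      = (if (S.length : Int) = 3 ∧ (C.length < 2 ∨ H.length < 2 ∨ D.length < 2) then (2 : Int) else 0) := by
    split_ifs <;> omega
  rw [h3, h2]
  ring_nf

lemma pvCountA_eq_sum (hands : List String) :
    pvCountA hands = (hands.map (pvCtb hands)).sum := by
  unfold pvCountA
  trans List.foldl (fun acc i => acc + pvCtb hands i) 0 hands
  · apply PySem.List.foldl_congr_mem
    intro acc x _
    simp only [pvCtb]
    split_ifs <;> omega
  · rw [PySem.List.foldl_add]; simp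

lemma pv_sum_rank (l : List String) (a k q : String → Bool) (kb qb : Int) :
    (l.map (fun c => if a c then (1 : Int) else if k c then kb else if q c then qb else 0)).sum
      = kb * (l.map (fun c => if !a c && k c then (1 : Int) else 0)).sum
        + qb * (l.map (fun c => if !a c && !k c && q c then (1 : Int) else 0)).sum
        + (l.map (fun c => if a c then (1 : Int) else 0)).sum := by
  induction l with
  | nil => simp
  | cons c t ih =>
    simp only [List.map_cons, List.sum_cons, ih]
    by_cases ha : a c <;> by_cases hk : k c <;> by_cases hq : q c <;>
      simp [ha, hk, hq] <;> ring

def pvKB (hands : List String) (s : Char) : Int :=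
  if (pvSuitCardsB hands s).length ≤ 3 ∧ (pvSuitCardsB hands s).length > 1 then 1
  else if (pvHaveA (pvSuitCardsB hands s) && decide ((pvSuitCardsB hands s).length ≤ 6)) ||
          (pvHaveJQT (pvSuitCardsB hands s) && decide ((pvSuitCardsB hands s).length ≤ 6)) then 1
  else 0

def pvQB (hands : List String) (s : Char) : Int :=
  if (4 ≥ (pvSuitCardsB hands 'C').length ∧ (pvSuitCardsB hands 'C').length ≥ 3) ∧
     (4 ≥ (pvSuitCardsB hands 'D').length ∧ (pvSuitCardsB hands 'D').length ≥ 3) ∧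
     (4 ≥ (pvSuitCardsB hands 'H').length ∧ (pvSuitCardsB hands 'H').length ≥ 3) then
    if pvHaveK (pvSuitCardsB hands s) && pvHaveA (pvSuitCardsB hands s) then 1 else 0
  else 0

lemma pvKB_eq (hands : List String) (s : Char) :
    pvKB hands s = if (1 < (pvSuitCardsB hands s).length ∧ (pvSuitCardsB hands s).length ≤ 3)
        ∨ ((pvSuitCardsB hands s).length ≤ 6 ∧
            (pvHaveA (pvSuitCardsB hands s) || pvHaveJQT (pvSuitCardsB hands s)) = true) then 1 else 0 := by
  unfold pvKB
  by_cases h1 : (pvSuitCardsB hands s).length ≤ 3 ∧ (pvSuitCardsB hands s).length > 1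
  · rw [if_pos h1, if_pos (Or.inl ⟨h1.2, h1.1⟩)]
  · rw [if_neg h1]
    by_cases h6 : (pvSuitCardsB hands s).length ≤ 6
    · by_cases hor : (pvHaveA (pvSuitCardsB hands s) || pvHaveJQT (pvSuitCardsB hands s)) = true
      · have hc2 : (pvHaveA (pvSuitCardsB hands s) && decide ((pvSuitCardsB hands s).length ≤ 6) ||
            pvHaveJQT (pvSuitCardsB hands s) && decide ((pvSuitCardsB hands s).length ≤ 6)) = true := by
          rcases pvBor.mp hor with h | h <;> simp [h, decide_eq_true h6]
        rw [if_pos hc2, if_pos (Or.inr ⟨h6, hor⟩)]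
      · have hc2 : ¬ ((pvHaveA (pvSuitCardsB hands s) && decide ((pvSuitCardsB hands s).length ≤ 6) ||
            pvHaveJQT (pvSuitCardsB hands s) && decide ((pvSuitCardsB hands s).length ≤ 6)) = true) := by
          intro hcon
          rcases pvBor.mp hcon with h | h <;>
            exact hor (pvBor.mpr (by
              first
                | exact Or.inl (pvBand.mp h).1
                | exact Or.inr (pvBand.mp h).1))
        rw [if_neg hc2, if_neg (by
          rintro (hl | hr)
          · exact h1 ⟨hl.2, hl.1⟩
          · exact hor hr.2)]
    · have hc2 : ¬ ((pvHaveA (pvSuitCardsB hands s) && decide ((pvSuitCardsB hands s).length ≤ 6) ||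
          pvHaveJQT (pvSuitCardsB hands s) && decide ((pvSuitCardsB hands s).length ≤ 6)) = true) := by
        intro hcon
        rcases pvBor.mp hcon with h | h <;>
          exact h6 (by
            have := (pvBand.mp h).2
            simpa [decide_eq_true_eq] using this)
      rw [if_neg hc2, if_neg (by
        rintro (hl | hr)
        · exact h1 ⟨hl.2, hl.1⟩
        · exact h6 hr.1)]

lemma pvQB_eq (hands : List String) (s : Char) :
    pvQB hands s = if ((decide (3 ≤ (pvSuitCardsB hands 'C').length ∧ (pvSuitCardsB hands 'C').length ≤ 4)
          && decide (3 ≤ (pvSuitCardsB hands 'D').length ∧ (pvSuitCardsB hands 'D').length ≤ 4)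
          && decide (3 ≤ (pvSuitCardsB hands 'H').length ∧ (pvSuitCardsB hands 'H').length ≤ 4))
        && pvHaveK (pvSuitCardsB hands s) && pvHaveA (pvSuitCardsB hands s)) = true then 1 else 0 := by
  unfold pvQB
  by_cases hP : (4 ≥ (pvSuitCardsB hands 'C').length ∧ (pvSuitCardsB hands 'C').length ≥ 3) ∧
      (4 ≥ (pvSuitCardsB hands 'D').length ∧ (pvSuitCardsB hands 'D').length ≥ 3) ∧
      (4 ≥ (pvSuitCardsB hands 'H').length ∧ (pvSuitCardsB hands 'H').length ≥ 3)
  · rw [if_pos hP]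
    have hmid : (decide (3 ≤ (pvSuitCardsB hands 'C').length ∧ (pvSuitCardsB hands 'C').length ≤ 4)
        && decide (3 ≤ (pvSuitCardsB hands 'D').length ∧ (pvSuitCardsB hands 'D').length ≤ 4)
        && decide (3 ≤ (pvSuitCardsB hands 'H').length ∧ (pvSuitCardsB hands 'H').length ≤ 4)) = true := by
      rw [Bool.and_eq_true, Bool.and_eq_true]
      refine ⟨⟨decide_eq_true ⟨hP.1.2, hP.1.1⟩, decide_eq_true ⟨hP.2.1.2, hP.2.1.1⟩⟩,
        decide_eq_true ⟨hP.2.2.2, hP.2.2.1⟩⟩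
    by_cases hin : (pvHaveK (pvSuitCardsB hands s) && pvHaveA (pvSuitCardsB hands s)) = true
    · have hin' := pvBand.mp hin
      rw [if_pos hin, if_pos (by
        rw [Bool.and_eq_true, Bool.and_eq_true]
        exact ⟨⟨hmid, hin'.1⟩, hin'.2⟩)]
    · rw [if_neg hin, if_neg (by
        rw [Bool.and_eq_true, Bool.and_eq_true]
        rintro ⟨⟨_, hK⟩, hA⟩
        exact hin (pvBand.mpr ⟨hK, hA⟩))]
  · rw [if_neg hP, if_neg (by
      intro h
      rw [Bool.and_eq_true, Bool.and_eq_true, Bool.and_eq_true, Bool.and_eq_true] at h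
      obtain ⟨⟨⟨⟨hd1, hd2⟩, hd3⟩, _⟩, _⟩ := h
      rw [decide_eq_true_eq] at hd1 hd2 hd3
      exact hP ⟨⟨hd1.2, hd1.1⟩, ⟨hd2.2, hd2.1⟩, ⟨hd3.2, hd3.1⟩⟩)]

lemma pvCtb_of_mem (hands : List String) (s : Char) (c : String) (hc : c ∈ pvSuitCardsB hands s) :
    pvCtb hands c = (if pvIsAce c then 1 else if pvIsKing c then pvKB hands s
      else if pvIsQueen c then pvQB hands s else 0) := by
  have hc' : c ∈ hands.filter (fun c => pvSuitB c == s) := hc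
  have hcs : pvSuitB c = s := beq_iff_eq.mp ((List.mem_filter.mp hc').2)
  have hAB : ∀ x : String, pvSuitA x = pvSuitB x := fun _ => rfl
  have hGS : ∀ (h : List String) (x : Char), getSameSuitCards h x = pvSuitCardsB h x :=
    fun _ _ => rfl
  simp only [pvCtb, pvKB, pvQB, hGS, hAB, hcs]

lemma pvPsv_eq_sum (hands : List String) (s : Char) :
    pvPsv hands s = ((pvSuitCardsB hands s).map (pvCtb hands)).sum := by
  rw [List.map_congr_left (fun c hc => pvCtb_of_mem hands s c hc)]
  rw [pv_sum_rank]
  have hk : ∀ c : String, (if !pvIsAce c && pvIsKing c then (1 : Int) else 0)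
      = (if pvIsKing c then 1 else 0) := by
    intro c
    by_cases h : pvIsKing c = true
    · have hs : PySem.Str.slice c none (some (-1)) = "K" := beq_iff_eq.mp h
      have ha : pvIsAce c = false := by simp [pvIsAce, hs]
      simp [h, ha]
    · have h' : pvIsKing c = false := by simpa using h
      simp [h']
  have hq : ∀ c : String, (if !pvIsAce c && (!pvIsKing c && pvIsQueen c) then (1 : Int) else 0)
      = (if pvIsQueen c then 1 else 0) := by
    intro c
    by_cases h : pvIsQueen c = true
    · have hs : PySem.Str.slice c none (some (-1)) = "Q" := beq_iff_eq.mp h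
      have ha : pvIsAce c = false := by simp [pvIsAce, hs]
      have hkk : pvIsKing c = false := by simp [pvIsKing, hs]
      simp [h, ha, hkk]
    · have h' : pvIsQueen c = false := by simpa using h
      simp [h']
  simp only [Bool.and_assoc] at *
  simp only [hk, hq]
  have hr1 : ∀ c : String, (pvRankB c == "1") = pvIsAce c := fun _ => rfl
  have hrK : ∀ c : String, (pvRankB c == "K") = pvIsKing c := fun _ => rfl
  have hrQ : ∀ c : String, (pvRankB c == "Q") = pvIsQueen c := fun _ => rfl
  have hha : ∀ l : List String, (List.any l fun c => pvIsAce c) = pvHaveA l := fun _ => rfl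
  have hhk : ∀ l : List String, (List.any l fun c => pvIsKing c) = pvHaveK l := fun _ => rfl
  have hhj : ∀ l : List String,
      (List.any l fun c => PySem.Str.isIn "J" c || PySem.Str.isIn "Q" c || PySem.Str.isIn "T" c)
        = pvHaveJQT l := fun _ => rfl
  simp only [pvPsv, hr1, hrK, hrQ, hha, hhk, hhj]
  rw [pvKB_eq, pvQB_eq]
  by_cases hC : (1 < (pvSuitCardsB hands s).length ∧ (pvSuitCardsB hands s).length ≤ 3)
      ∨ ((pvSuitCardsB hands s).length ≤ 6 ∧
          (pvHaveA (pvSuitCardsB hands s) || pvHaveJQT (pvSuitCardsB hands s)) = true) <;>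
    by_cases hQc : ((decide (3 ≤ (pvSuitCardsB hands 'C').length ∧ (pvSuitCardsB hands 'C').length ≤ 4)
          && decide (3 ≤ (pvSuitCardsB hands 'D').length ∧ (pvSuitCardsB hands 'D').length ≤ 4)
          && decide (3 ≤ (pvSuitCardsB hands 'H').length ∧ (pvSuitCardsB hands 'H').length ≤ 4))
        && pvHaveK (pvSuitCardsB hands s) && pvHaveA (pvSuitCardsB hands s)) = true <;>
    simp [hC, hQc]

lemma pvSuitsB_step_nodup (l : List String) : ∀ acc : List Char, acc.Nodup →
    (l.foldl (fun acc c => if pvSuitB c ∈ acc then acc else acc ++ [pvSuitB c]) acc).Nodup := by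
  induction l with
  | nil => intro acc h; simpa using h
  | cons a t ih =>
    intro acc h
    simp only [List.foldl_cons]
    by_cases hc : pvSuitB a ∈ acc
    · rw [if_pos hc]; exact ih acc h
    · rw [if_neg hc]
      refine ih _ ?_
      rw [List.nodup_append]
      refine ⟨h, List.nodup_singleton _, ?_⟩
      intro y hy z hz
      obtain rfl := List.mem_singleton.mp hz
      intro hEq
      exact hc (hEq ▸ hy)

lemma pvSuitsB_nodup (hands : List String) : (pvSuitsB hands).Nodup := by
  unfold pvSuitsB
  exact pvSuitsB_step_nodup hands [] List.nodup_nil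

lemma pvSuitsB_step_sub (l : List String) : ∀ (acc : List Char) (x : Char), x ∈ acc →
    x ∈ l.foldl (fun acc c => if pvSuitB c ∈ acc then acc else acc ++ [pvSuitB c]) acc := by
  induction l with
  | nil => intro acc x h; simpa using h
  | cons a t ih =>
    intro acc x h
    simp only [List.foldl_cons]
    by_cases hc : pvSuitB a ∈ acc
    · rw [if_pos hc]; exact ih acc x h
    · rw [if_neg hc]; exact ih _ x (by simp [h])

lemma pvSuitsB_step_mem (l : List String) : ∀ (acc : List Char) (c : String), c ∈ l →
    pvSuitB c ∈ l.foldl (fun acc c => if pvSuitB c ∈ acc then acc else acc ++ [pvSuitB c]) acc := by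
  induction l with
  | nil => intro _ _ h; simp at h
  | cons a t ih =>
    intro acc c h
    rcases List.mem_cons.mp h with rfl | h
    · simp only [List.foldl_cons]
      by_cases hc : pvSuitB c ∈ acc
      · rw [if_pos hc]; exact pvSuitsB_step_sub t acc _ hc
      · rw [if_neg hc]; exact pvSuitsB_step_sub t _ _ (by simp)
    · simp only [List.foldl_cons]
      by_cases hc : pvSuitB a ∈ acc
      · rw [if_pos hc]; exact ih _ c h
      · rw [if_neg hc]; exact ih _ c h

lemma pvSuitsB_mem (hands : List String) (c : String) (hc : c ∈ hands) :
    pvSuitB c ∈ pvSuitsB hands := by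
  unfold pvSuitsB
  exact pvSuitsB_step_mem hands [] c hc

lemma pv_zero_sum (suits : List Char) (a : Char) (v : Int) (ha : a ∉ suits) :
    (suits.map (fun s => if a == s then v else 0)).sum = 0 := by
  apply List.sum_eq_zero
  intro x hx
  rcases List.mem_map.mp hx with ⟨s, hs, rfl⟩
  have : ¬ (a == s) = true := by
    intro h
    exact ha (by simpa [beq_iff_eq.mp h] using hs)
  simp [this]

lemma pv_single_sum (suits : List Char) (a : Char) (v : Int)
    (hnd : suits.Nodup) (ha : a ∈ suits) :
    (suits.map (fun s => if a == s then v else 0)).sum = v := by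
  induction suits with
  | nil => simp at ha
  | cons s t ih =>
    rcases List.nodup_cons.mp hnd with ⟨hns, hnt⟩
    simp only [List.map_cons, List.sum_cons]
    rcases List.mem_cons.mp ha with rfl | hat
    · rw [if_pos (by simp), pv_zero_sum t a v hns]
      omega
    · have hne : ¬ ((a == s) = true) := fun h => hns (beq_iff_eq.mp h ▸ hat)
      rw [if_neg hne, ih hnt hat]
      omega

lemma pv_partition_sum (suits : List Char) (l : List String) (f : String → Int)
    (hnd : suits.Nodup) (hall : ∀ c ∈ l, pvSuitB c ∈ suits) :
    (suits.map (fun s => ((l.filter (fun c => pvSuitB c == s)).map f).sum)).sum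
      = (l.map f).sum := by
  induction l with
  | nil => simp
  | cons c t ih =>
    have hfun : ∀ s ∈ suits,
        (((c :: t).filter (fun c => pvSuitB c == s)).map f).sum
          = (if pvSuitB c == s then f c else 0) + ((t.filter (fun c => pvSuitB c == s)).map f).sum := by
      intro s _
      by_cases h : (pvSuitB c == s) = true <;> simp [List.filter_cons, h]
    rw [List.map_congr_left hfun, PySem.List.sum_map_add_int]
    rw [pv_single_sum suits (pvSuitB c) (f c) hnd (hall c (by simp))]
    rw [ih (fun x hx => hall x (by simp [hx]))]
    simp

lemma pvCountB_eq_sum (hands : List String) :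
    pvCountB hands = (hands.map (pvCtb hands)).sum := by
  unfold pvCountB
  trans List.foldl (fun acc s => acc + pvPsv hands s) 0 (pvSuitsB hands)
  · apply PySem.List.foldl_congr_mem
    intro acc s _
    simp only [pvPsv]
    split_ifs <;> omega
  · rw [PySem.List.foldl_add]
    have hmap : ∀ s ∈ pvSuitsB hands,
        pvPsv hands s = ((hands.filter (fun c => pvSuitB c == s)).map (pvCtb hands)).sum :=
      fun s _ => pvPsv_eq_sum hands s
    rw [List.map_congr_left hmap]
    rw [pv_partition_sum (pvSuitsB hands) hands (pvCtb hands) (pvSuitsB_nodup hands)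
      (fun c hc => pvSuitsB_mem hands c hc)]
    simp

lemma pvCount_eq (hands : List String) : pvCountA hands = pvCountB hands := by
  rw [pvCountA_eq_sum, pvCountB_eq_sum]

-- ===== VERDICT (by name: the statement is the Claim_ definition above) =====
theorem hardBidding_spec : Claim_equal_hardBidding := by
  intro hands _ _
  show hardBidding hands = hardBidding_alt hands
  have h1 : hardBidding hands
      = pvTailA (getSameSuitCards hands 'C') (getSameSuitCards hands 'D')
          (getSameSuitCards hands 'H') (getSameSuitCards hands 'S') (pvCountA hands) := rfl
  have h2 : hardBidding_alt hands
      = pvTailB (pvSuitCardsB hands 'C') (pvSuitCardsB hands 'D')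
          (pvSuitCardsB hands 'H') (pvSuitCardsB hands 'S') (pvCountB hands) := rfl
  rw [h1, h2, pvCount_eq]
  exact pvTail_eq _ _ _ _ _
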